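-- pv_equiv track=rewrite | github.com/hnyoojin/chim-boogie | solved/week2/yoojin/prob1.py | is_valid_rectangle
-- ===== SOURCE A (Python) =====
-- def is_valid_rectangle(i, j, h, w, n):
--     # RU
--     for k in range(1, h + 1):
--         ni, nj = i + h + w - k, j - h + w + k
--         if not (0 <= ni < n and 0 <= nj < n):
--             return False
--     # LU
--     for k in range(1, w):
--         ni, nj = i + w - k, j + w - k
--         if not (0 <= ni < n and 0 <= nj < n):
--             return False
--     # LD
--     for k in range(1, h + 1):
--         ni, nj = i + k, j - k
--         if not (0 <= ni < n and 0 <= nj < n):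
--             return False
--     # RD
--     for k in range(1, w + 1):
--         ni, nj = i + h + k, j - h + k
--         if not (0 <= ni < n and 0 <= nj < n):
--             return False
--
--
--
--     return True
-- ===== SOURCE B (Python) =====
-- def is_valid_rectangle(i, j, h, w, n):
--     # O(1): each edge's coordinates are linear (slope +/-1) in k, so the
--     # min/max over the edge occur at its endpoints; check only endpoints.
--     def inside(ni, nj):
--         return 0 <= ni < n and 0 <= nj < n
--     def edge(nonempty, p, q):
--         return (not nonempty) or (inside(*p) and inside(*q))
--     return (edge(h >= 1, (i + h + w - 1, j - h + w + 1), (i + w, j + w)) and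
--             edge(w >= 2, (i + w - 1, j + w - 1), (i + 1, j + 1)) and
--             edge(h >= 1, (i + 1, j - 1), (i + h, j - h)) and
--             edge(w >= 1, (i + h + 1, j - h + 1), (i + h + w, j - h + w)))
-- ===== Notes on version B (the rewrite author's own statement) =====
-- stated objective: faster
-- what changed: Replaces the four O(h+w) per-point boundary loops by O(1) checks of just the two endpoints of each edge, valid because each edge coordinate is a monotone linear function of the loop index.
import Mathlib
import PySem

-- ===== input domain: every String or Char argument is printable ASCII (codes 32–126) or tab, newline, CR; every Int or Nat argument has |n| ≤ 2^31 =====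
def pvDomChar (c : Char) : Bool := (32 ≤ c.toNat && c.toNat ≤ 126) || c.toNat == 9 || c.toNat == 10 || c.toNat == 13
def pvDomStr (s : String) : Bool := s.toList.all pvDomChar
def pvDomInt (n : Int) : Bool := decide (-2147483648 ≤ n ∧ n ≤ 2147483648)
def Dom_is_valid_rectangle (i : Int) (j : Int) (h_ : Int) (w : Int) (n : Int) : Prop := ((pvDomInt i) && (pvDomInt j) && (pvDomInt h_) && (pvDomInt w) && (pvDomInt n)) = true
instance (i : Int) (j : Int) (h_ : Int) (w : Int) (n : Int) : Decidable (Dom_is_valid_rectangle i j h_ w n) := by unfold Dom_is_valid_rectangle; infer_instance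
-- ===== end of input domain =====

-- B replaces A's four O(h+w) per-point boundary loops by O(1) checks of the two
-- endpoints of each edge (each edge coordinate is monotone linear in the index).

-- ===== PORT A =====
-- 'for k in range(a, b): if not cond(k): return False' = pyForA a b cond: it visits
-- k = a, a+1, … in order and stops at the first failing k, exactly as Python does;
-- the four loops run in sequence, so A is their short-circuit && chain.
def pyForA (a b : Int) (p : Int → Bool) : Bool :=
  if _h : a < b then p a && pyForA (a + 1) b p else true
termination_by (b - a).toNat
decreasing_by omega

def is_valid_rectangle (i : Int) (j : Int) (h_ : Int) (w : Int) (n : Int) : Bool :=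
  -- RU
  (pyForA 1 (h_ + 1) (fun k =>
      decide (0 ≤ i + h_ + w - k ∧ i + h_ + w - k < n ∧ 0 ≤ j - h_ + w + k ∧ j - h_ + w + k < n))) &&
  -- LU
  (pyForA 1 w (fun k =>
      decide (0 ≤ i + w - k ∧ i + w - k < n ∧ 0 ≤ j + w - k ∧ j + w - k < n))) &&
  -- LD
  (pyForA 1 (h_ + 1) (fun k =>
      decide (0 ≤ i + k ∧ i + k < n ∧ 0 ≤ j - k ∧ j - k < n))) &&
  -- RD
  (pyForA 1 (w + 1) (fun k =>
      decide (0 ≤ i + h_ + k ∧ i + h_ + k < n ∧ 0 ≤ j - h_ + k ∧ j - h_ + k < n)))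

-- ===== PORT B =====
def pvInside (n ni nj : Int) : Bool := decide (0 ≤ ni ∧ ni < n ∧ 0 ≤ nj ∧ nj < n)

def pvEdge (n : Int) (nonempty : Bool) (p q : Int × Int) : Bool :=
  !nonempty || (pvInside n p.1 p.2 && pvInside n q.1 q.2)

def is_valid_rectangle_alt (i : Int) (j : Int) (h_ : Int) (w : Int) (n : Int) : Bool :=
  pvEdge n (decide (1 ≤ h_)) (i + h_ + w - 1, j - h_ + w + 1) (i + w, j + w) &&
  pvEdge n (decide (2 ≤ w)) (i + w - 1, j + w - 1) (i + 1, j + 1) &&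
  pvEdge n (decide (1 ≤ h_)) (i + 1, j - 1) (i + h_, j - h_) &&
  pvEdge n (decide (1 ≤ w)) (i + h_ + 1, j - h_ + 1) (i + h_ + w, j - h_ + w)

-- ===== PRECONDITION & SPEC =====
def Spec_is_valid_rectangle (i : Int) (j : Int) (h_ : Int) (w : Int) (n : Int) (out : Bool) : Prop := out = is_valid_rectangle_alt i j h_ w n
instance (i : Int) (j : Int) (h_ : Int) (w : Int) (n : Int) (out : Bool) : Decidable (Spec_is_valid_rectangle i j h_ w n out) := by unfold Spec_is_valid_rectangle; infer_instance

-- ===== CLAIM (what is proved, stated in full; the proofs are below) =====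
def Claim_equal_is_valid_rectangle : Prop := ∀ (i : Int) (j : Int) (h_ : Int) (w : Int) (n : Int), Dom_is_valid_rectangle i j h_ w n → Spec_is_valid_rectangle i j h_ w n (is_valid_rectangle i j h_ w n)

-- ===== LEMMAS AND PROOFS =====

theorem pyForA_eq_all (b : Int) (p : Int → Bool) : ∀ (m : Nat) (a : Int), (b - a).toNat = m →
    pyForA a b p = (PySem.List.pyRange a b 1).all p := by
  intro m
  induction m with
  | zero =>
    intro a ha
    rw [pyForA, PySem.List.pyRange_one_eq_nil (by omega)]
    simp [show ¬ a < b by omega]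
  | succ m ih =>
    intro a ha
    rw [pyForA, PySem.List.pyRange_one_cons (by omega)]
    simp only [show a < b by omega, dite_true, List.all_cons]
    rw [ih (a + 1) (by omega)]

theorem edge1_iff (i j h_ w n : Int) :
    (∀ k : Int, 1 ≤ k → k < h_ + 1 →
        (0 ≤ i + h_ + w - k ∧ i + h_ + w - k < n ∧ 0 ≤ j - h_ + w + k ∧ j - h_ + w + k < n)) ↔
    (¬ (1 ≤ h_) ∨
      ((0 ≤ i + h_ + w - 1 ∧ i + h_ + w - 1 < n ∧ 0 ≤ j - h_ + w + 1 ∧ j - h_ + w + 1 < n) ∧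
       (0 ≤ i + w ∧ i + w < n ∧ 0 ≤ j + w ∧ j + w < n))) := by
  constructor
  · intro H
    by_cases hm : 1 ≤ h_
    · have h1 := H 1 (by omega) (by omega)
      have h2 := H h_ (by omega) (by omega)
      omega
    · omega
  · intro H k hk1 hk2
    omega

theorem edge2_iff (i j w n : Int) :
    (∀ k : Int, 1 ≤ k → k < w →
        (0 ≤ i + w - k ∧ i + w - k < n ∧ 0 ≤ j + w - k ∧ j + w - k < n)) ↔
    (¬ (2 ≤ w) ∨
      ((0 ≤ i + w - 1 ∧ i + w - 1 < n ∧ 0 ≤ j + w - 1 ∧ j + w - 1 < n) ∧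
       (0 ≤ i + 1 ∧ i + 1 < n ∧ 0 ≤ j + 1 ∧ j + 1 < n))) := by
  constructor
  · intro H
    by_cases hm : 2 ≤ w
    · have h1 := H 1 (by omega) (by omega)
      have h2 := H (w - 1) (by omega) (by omega)
      omega
    · omega
  · intro H k hk1 hk2
    omega

theorem edge3_iff (i j h_ n : Int) :
    (∀ k : Int, 1 ≤ k → k < h_ + 1 →
        (0 ≤ i + k ∧ i + k < n ∧ 0 ≤ j - k ∧ j - k < n)) ↔
    (¬ (1 ≤ h_) ∨
      ((0 ≤ i + 1 ∧ i + 1 < n ∧ 0 ≤ j - 1 ∧ j - 1 < n) ∧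
       (0 ≤ i + h_ ∧ i + h_ < n ∧ 0 ≤ j - h_ ∧ j - h_ < n))) := by
  constructor
  · intro H
    by_cases hm : 1 ≤ h_
    · have h1 := H 1 (by omega) (by omega)
      have h2 := H h_ (by omega) (by omega)
      omega
    · omega
  · intro H k hk1 hk2
    omega

theorem edge4_iff (i j h_ w n : Int) :
    (∀ k : Int, 1 ≤ k → k < w + 1 →
        (0 ≤ i + h_ + k ∧ i + h_ + k < n ∧ 0 ≤ j - h_ + k ∧ j - h_ + k < n)) ↔
    (¬ (1 ≤ w) ∨
      ((0 ≤ i + h_ + 1 ∧ i + h_ + 1 < n ∧ 0 ≤ j - h_ + 1 ∧ j - h_ + 1 < n) ∧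
       (0 ≤ i + h_ + w ∧ i + h_ + w < n ∧ 0 ≤ j - h_ + w ∧ j - h_ + w < n))) := by
  constructor
  · intro H
    by_cases hm : 1 ≤ w
    · have h1 := H 1 (by omega) (by omega)
      have h2 := H w (by omega) (by omega)
      omega
    · omega
  · intro H k hk1 hk2
    omega

-- ===== VERDICT (by name: the statement is the Claim_ definition above) =====
theorem is_valid_rectangle_spec : Claim_equal_is_valid_rectangle := by
  intro i j h_ w n _
  unfold Spec_is_valid_rectangle is_valid_rectangle is_valid_rectangle_alt pvEdge pvInside
  rw [pyForA_eq_all (h_ + 1) _ _ 1 rfl, pyForA_eq_all w _ _ 1 rfl,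
    pyForA_eq_all (h_ + 1) _ _ 1 rfl, pyForA_eq_all (w + 1) _ _ 1 rfl]
  rw [Bool.eq_iff_iff]
  simp only [Bool.and_eq_true, Bool.or_eq_true, Bool.not_eq_eq_eq_not, Bool.not_true,
    decide_eq_false_iff_not, decide_eq_true_eq, List.all_eq_true,
    PySem.List.mem_pyRange_one]
  constructor
  · rintro ⟨⟨⟨H1, H2⟩, H3⟩, H4⟩
    refine ⟨⟨⟨?_, ?_⟩, ?_⟩, ?_⟩
    · exact (edge1_iff i j h_ w n).mp (fun k hk1 hk2 => H1 k ⟨hk1, hk2⟩)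
    · exact (edge2_iff i j w n).mp (fun k hk1 hk2 => H2 k ⟨hk1, hk2⟩)
    · exact (edge3_iff i j h_ n).mp (fun k hk1 hk2 => H3 k ⟨hk1, hk2⟩)
    · exact (edge4_iff i j h_ w n).mp (fun k hk1 hk2 => H4 k ⟨hk1, hk2⟩)
  · rintro ⟨⟨⟨H1, H2⟩, H3⟩, H4⟩
    refine ⟨⟨⟨?_, ?_⟩, ?_⟩, ?_⟩
    · exact fun k hk => (edge1_iff i j h_ w n).mpr H1 k hk.1 hk.2
    · exact fun k hk => (edge2_iff i j w n).mpr H2 k hk.1 hk.2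
    · exact fun k hk => (edge3_iff i j h_ n).mpr H3 k hk.1 hk.2
    · exact fun k hk => (edge4_iff i j h_ w n).mpr H4 k hk.1 hk.2
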